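-- pv_equiv track=rewrite | github.com/nodarisvanidze88/chess_task | chess_task.py | count_figures
-- ===== SOURCE A (Python) =====
-- def count_figures(user):
--     current_figures = {}
--     for i in user:
--         for k in i:
--             if k =="w" or k=="b":
--                 continue
--             else:
--                 current_figures[k] = current_figures.get(k,0)+1
--     return dict(sorted(current_figures.items(), key = lambda x: x[0]))
-- ===== SOURCE B (Python) =====
-- def count_figures(user):
--     figs = sorted(k for row in user for k in row if k != "w" and k != "b")
--     result = {}
--     i, n = 0, len(figs)
--     while i < n:
--         j = i
--         while j < n and figs[j] == figs[i]:
--             j += 1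
--         result[figs[i]] = j - i
--         i = j
--     return result
-- ===== Notes on version B (the rewrite author's own statement) =====
-- stated objective: alternative
-- what changed: A counts every non-'w'/'b' string into a dict while scanning the nested lists and sorts the dict items at the end; B first flattens, filters and sorts all strings into one list, then builds the result in a single run-length sweep over consecutive equal runs, so no dict counting pass is needed.
import Mathlib
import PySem

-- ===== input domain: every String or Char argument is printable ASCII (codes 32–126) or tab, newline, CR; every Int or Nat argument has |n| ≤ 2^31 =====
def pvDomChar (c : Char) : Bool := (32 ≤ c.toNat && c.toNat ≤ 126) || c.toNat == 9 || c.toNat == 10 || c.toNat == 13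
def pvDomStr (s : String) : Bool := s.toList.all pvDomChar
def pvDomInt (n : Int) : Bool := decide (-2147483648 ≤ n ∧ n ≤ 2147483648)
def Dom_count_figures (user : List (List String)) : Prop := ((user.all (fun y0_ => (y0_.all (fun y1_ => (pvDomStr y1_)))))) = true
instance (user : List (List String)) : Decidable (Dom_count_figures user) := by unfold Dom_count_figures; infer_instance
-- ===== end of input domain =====

-- B replaces A's dict-counting pass plus final sort of the items by a flatten-filter-sort pass
-- followed by a single run-length sweep over the sorted list (alternative decomposition, same cost).

-- ===== PORT A =====
def count_figures (user : List (List String)) : List (String × Int) :=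
  let current_figures : PySem.Dict String Int :=
    user.foldl (fun d i =>
      i.foldl (fun d k =>
        if k == "w" || k == "b" then d
        else d.insert k (d.getD k 0 + 1)) d) PySem.Dict.empty
  -- dict(sorted(current_figures.items(), key=lambda x: x[0]))
  (PySem.Dict.ofList (PySem.List.sorted current_figures.items (fun x => x.1) false)).items

-- ===== PORT B =====
-- the two-pointer sweep of Source B: each step takes one maximal run figs[i..j) and records its length
def pvRuns : List String → List (String × Int)
  | [] => []
  | k :: t =>
    (k, 1 + ((t.takeWhile (fun x => x == k)).length : Int)) ::
      pvRuns (t.dropWhile (fun x => x == k))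
termination_by s => s.length
decreasing_by
  simpa [List.length_cons] using Nat.lt_succ_of_le (List.length_dropWhile_le (fun x => x == k) t)

def count_figures_alt (user : List (List String)) : List (String × Int) :=
  let figs := PySem.List.sorted
    ((user.flatMap (fun row => row)).filter (fun k => k != "w" && k != "b"))
    (fun x => x) false
  pvRuns figs

-- ===== PRECONDITION & SPEC =====
def Spec_count_figures (user : List (List String)) (out : List (String × Int)) : Prop := out = count_figures_alt user
instance (user : List (List String)) (out : List (String × Int)) : Decidable (Spec_count_figures user out) := by unfold Spec_count_figures; infer_instance

-- ===== CLAIM (what is proved, stated in full; the proofs are below) =====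
def Claim_equal_count_figures : Prop := ∀ (user : List (List String)), Dom_count_figures user → Spec_count_figures user (count_figures user)

-- ===== LEMMAS AND PROOFS =====

-- In a sorted list k :: t, everything the head run drops is strictly greater than k.
theorem run_gt (k : String) (t : List String) (hs : (k::t).Pairwise (· ≤ ·)) :
    ∀ x ∈ t.dropWhile (fun x => x == k), k < x := by
  have hle : ∀ x ∈ t, k ≤ x := fun x hx => (List.pairwise_cons.1 hs).1 x hx
  cases hr : t.dropWhile (fun x => x == k) with
  | nil => intro x hx; simp at hx
  | cons r0 rt =>
    have hsub := List.dropWhile_sublist (l := t) (p := fun x => x == k)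
    rw [hr] at hsub
    have hr0ne : r0 ≠ k := by
      have := List.head_dropWhile_not (p := fun x => x == k) (l := t) (by simp [hr])
      simpa [hr] using this
    have hr0 : k < r0 :=
      lt_of_le_of_ne (hle r0 (hsub.subset (by simp))) (Ne.symm hr0ne)
    have hpw : (r0 :: rt).Pairwise (· ≤ ·) :=
      ((List.pairwise_cons.1 hs).2).sublist hsub
    intro x hx
    rcases List.mem_cons.1 hx with h | h
    · exact h ▸ hr0
    · exact lt_of_lt_of_le hr0 ((List.pairwise_cons.1 hpw).1 x h)

-- In a sorted list k :: t, the head run length is the multiplicity of k.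
theorem run_count (k : String) (t : List String) (hs : (k::t).Pairwise (· ≤ ·)) :
    (k::t).count k = 1 + (t.takeWhile (fun x => x == k)).length := by
  have hgt := run_gt k t hs
  have hnot : k ∉ t.dropWhile (fun x => x == k) := fun h => lt_irrefl k (hgt k h)
  have htake : (t.takeWhile (fun x => x == k)).count k = (t.takeWhile (fun x => x == k)).length := by
    rw [List.count_eq_length]
    intro b hb
    exact (eq_of_beq (List.mem_takeWhile_imp (p := fun x => x == k) (l := t) hb)).symm
  have hsplit : t.count k = (t.takeWhile (fun x => x == k)).count k + (t.dropWhile (fun x => x == k)).count k := by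
    conv_lhs => rw [← List.takeWhile_append_dropWhile (p := fun x => x == k) (l := t)]
    rw [List.count_append]
  have hdz : (t.dropWhile (fun x => x == k)).count k = 0 := List.count_eq_zero_of_not_mem hnot
  have hc : (k::t).count k = t.count k + 1 := List.count_cons_self
  omega

-- Multiplicity of any key other than k is unchanged by dropping the head run.
theorem run_count_other (k : String) (t : List String) (hs : (k::t).Pairwise (· ≤ ·))
    (k' : String) (hk' : k' ≠ k) (hk'take : k' ∉ t.takeWhile (fun x => x == k)) :
    (k::t).count k' = (t.dropWhile (fun x => x == k)).count k' := by
  have hsplit : t.count k' = (t.takeWhile (fun x => x == k)).count k' + (t.dropWhile (fun x => x == k)).count k' := by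
    conv_lhs => rw [← List.takeWhile_append_dropWhile (p := fun x => x == k) (l := t)]
    rw [List.count_append]
  have htz : (t.takeWhile (fun x => x == k)).count k' = 0 := List.count_eq_zero_of_not_mem hk'take
  have hc : (k::t).count k' = t.count k' := List.count_cons_of_ne (Ne.symm hk')
  omega

-- On a sorted list, pvRuns produces exactly the pairs (k, multiplicity of k).
theorem pvRuns_mem (s : List String) (hs : s.Pairwise (· ≤ ·)) (p : String × Int) :
    p ∈ pvRuns s ↔ p.1 ∈ s ∧ p.2 = (s.count p.1 : Int) := by
  induction s using pvRuns.induct with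
  | case1 => simp [pvRuns]
  | case2 k t ih =>
    have hgt := run_gt k t hs
    have hcnt := run_count k t hs
    have hrest : (t.dropWhile (fun x => x == k)).Pairwise (· ≤ ·) :=
      ((List.pairwise_cons.1 hs).2).sublist (List.dropWhile_sublist _)
    have ih' := ih hrest
    have ht : t = t.takeWhile (fun x => x == k) ++ t.dropWhile (fun x => x == k) :=
      (List.takeWhile_append_dropWhile).symm
    rw [pvRuns, List.mem_cons]
    constructor
    · rintro (h | h)
      · rw [h]
        refine ⟨List.mem_cons_self, ?_⟩
        simp only [hcnt]; push_cast; ring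
      · obtain ⟨hmem, hval⟩ := ih'.1 h
        have hne : p.1 ≠ k := fun he => lt_irrefl k (he ▸ hgt p.1 hmem)
        have hk'take : p.1 ∉ t.takeWhile (fun x => x == k) := fun hm =>
          hne (eq_of_beq (List.mem_takeWhile_imp (p := fun x => x == k) (l := t) hm))
        refine ⟨List.mem_cons_of_mem _ ((List.dropWhile_sublist _).subset hmem), ?_⟩
        rw [hval, run_count_other k t hs p.1 hne hk'take]
    · rintro ⟨hmem, hval⟩
      by_cases he : p.1 = k
      · left
        have h2 : p.2 = 1 + ((t.takeWhile (fun x => x == k)).length : Int) := by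
          rw [hval, he, hcnt]; push_cast; ring
        obtain ⟨a, b⟩ := p
        simp only at he h2
        rw [he, h2]
      · right
        have hk'take : p.1 ∉ t.takeWhile (fun x => x == k) := fun hm =>
          he (eq_of_beq (List.mem_takeWhile_imp (p := fun x => x == k) (l := t) hm))
        have hmemt : p.1 ∈ t := by
          rcases List.mem_cons.1 hmem with h | h
          · exact absurd h he
          · exact h
        have hmemd : p.1 ∈ t.dropWhile (fun x => x == k) := by
          conv at hmemt => rw [ht]
          rcases List.mem_append.1 hmemt with h | h
          · exact absurd h hk'take
          · exact h
        exact ih'.2 ⟨hmemd, by rw [hval, run_count_other k t hs p.1 he hk'take]⟩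

-- On a sorted list, the run keys are strictly increasing.
theorem pvRuns_pairwise (s : List String) (hs : s.Pairwise (· ≤ ·)) :
    (pvRuns s).Pairwise (fun a b => a.1 < b.1) := by
  induction s using pvRuns.induct with
  | case1 => simp [pvRuns]
  | case2 k t ih =>
    have hgt := run_gt k t hs
    have hrest : (t.dropWhile (fun x => x == k)).Pairwise (· ≤ ·) :=
      ((List.pairwise_cons.1 hs).2).sublist (List.dropWhile_sublist _)
    rw [pvRuns]
    refine List.pairwise_cons.2 ⟨?_, ih hrest⟩
    intro p hp
    exact hgt p.1 ((pvRuns_mem _ hrest p).1 hp).1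

-- A's nested loop over the rows is the same fold over the flattened list.
theorem pv_foldl_foldl (user : List (List String)) (g : PySem.Dict String Int → String → PySem.Dict String Int) (d : PySem.Dict String Int) :
    user.foldl (fun d i => i.foldl g d) d = (user.flatMap (fun row => row)).foldl g d := by
  induction user generalizing d with
  | nil => rfl
  | cons h t ih => simp [List.flatMap_cons, List.foldl_append, ih]

theorem pv_main (user : List (List String)) : count_figures user = count_figures_alt user := by
  unfold count_figures count_figures_alt
  simp only []
  set flat := (user.flatMap (fun row => row)).filter (fun k => k != "w" && k != "b") with hflat
  set s := PySem.List.sorted flat (fun x => x) false with hsdef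
  -- step 1: the double loop builds counter flat
  have hfun : (fun (d : PySem.Dict String Int) (k : String) => if k == "w" || k == "b" then d else d.insert k (d.getD k 0 + 1))
      = (fun d k => if (k != "w" && k != "b") then d.insert k (d.getD k 0 + 1) else d) := by
    funext d k
    cases h1 : k == "w" <;> cases h2 : k == "b" <;> simp only [bne, h1, h2] <;> simp
  have hdict : user.foldl (fun d i =>
      i.foldl (fun d k =>
        if k == "w" || k == "b" then d
        else d.insert k (d.getD k 0 + 1)) d) PySem.Dict.empty = PySem.Dict.counter flat := by
    rw [pv_foldl_foldl, hfun, ← List.foldl_filter, ← hflat,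
      PySem.Dict.foldl_insert_getD_add_one_eq_counter]
  rw [hdict, PySem.Dict.items_counter]
  -- step 2: facts about the sorted flat list
  have hsp : s.Pairwise (· ≤ ·) := PySem.List.sorted_pairwise flat (fun x => x)
  have hperm : s.Perm flat := PySem.List.sorted_perm flat (fun x => x) false
  have hpw := pvRuns_pairwise s hsp
  -- step 3: pvRuns s is a permutation of the counter items
  have hnd1 : (pvRuns s).Nodup := List.Pairwise.imp (fun {a b} h => fun he => absurd (congrArg Prod.fst he) (ne_of_lt h)) hpw
  have hnd2 : ((PySem.Set.ofList flat).map (fun k => (k, (flat.count k : Int)))).Nodup :=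
    (PySem.Set.nodup_ofList flat).map (fun a b h => congrArg Prod.fst h)
  have hmem : ∀ p, p ∈ pvRuns s ↔ p ∈ (PySem.Set.ofList flat).map (fun k => (k, (flat.count k : Int))) := by
    intro p
    rw [pvRuns_mem s hsp p, List.mem_map]
    constructor
    · rintro ⟨h1, h2⟩
      refine ⟨p.1, (PySem.Set.mem_ofList flat p.1).2 (hperm.mem_iff.1 h1), ?_⟩
      obtain ⟨a, b⟩ := p
      simp only at h1 h2 ⊢
      rw [h2, hperm.count_eq]
    · rintro ⟨k, hk, he⟩
      rw [← he]
      exact ⟨hperm.mem_iff.2 ((PySem.Set.mem_ofList flat k).1 hk), by simp [hperm.count_eq]⟩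
  have hp : (pvRuns s).Perm ((PySem.Set.ofList flat).map (fun k => (k, (flat.count k : Int)))) :=
    (List.perm_ext_iff_of_nodup hnd1 hnd2).2 hmem
  -- step 4: sorting the items by key yields exactly pvRuns s
  have hsorted : PySem.List.sorted ((PySem.Set.ofList flat).map (fun k => (k, (flat.count k : Int)))) (fun x => x.1) false = pvRuns s :=
    PySem.List.sorted_eq_of_perm_of_pairwise_lt _ _ _ hp hpw
  rw [hsorted]
  -- step 5: dict() of a unique-key pair list leaves it unchanged
  have hkeys : ((pvRuns s).map Prod.fst).Nodup :=
    (List.pairwise_map.2 hpw).imp (fun {a b} h => ne_of_lt h)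
  have := PySem.Dict.items_foldl_insert_fresh (l := pvRuns s) (k := Prod.fst) (v := Prod.snd) (d := PySem.Dict.empty) (by simp) hkeys
  simpa [PySem.Dict.ofList, PySem.Dict.update] using this

-- ===== VERDICT (by name: the statement is the Claim_ definition above) =====
theorem count_figures_spec : Claim_equal_count_figures := by
  intro user _
  unfold Spec_count_figures
  exact pv_main user
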